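-- pv_equiv track=rewrite | github.com/Arsen1302/Code-copy-detector | TestData/solutions/problem_659_5.py | solution_659_5
-- ===== SOURCE A (Python) =====
-- def solution_659_5(arr):
--     n = len(arr)
--
--     up, down = [0]*n, [0]*n
--
--     up[0], down[0] = 1, 1
--
--     for i in range(1,n):
--         if arr[i] > arr[i-1]:
--             up[i] = down[i-1] + 1
--             down[i] = 1
--         elif arr[i] < arr[i-1]:
--             down[i] = up[i-1] + 1
--             up[i] = 1
--         else:
--             up[i] = 1
--             down[i] = 1
--
--     return max(max(up),max(down))
-- ===== SOURCE B (Python) =====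
-- def solution_659_5(arr):
--     best = cur = 1
--     direction = 0
--     for prev, x in zip(arr, arr[1:]):
--         c = (x > prev) - (x < prev)
--         if c == 0:
--             cur = 1
--         elif direction == -c:
--             cur += 1
--         else:
--             cur = 2
--         direction = c
--         if cur > best:
--             best = cur
--     return best
-- ===== Notes on version B (the rewrite author's own statement) =====
-- stated objective: alternative
-- what changed: Replaces A's two length-n DP arrays (up/down, finished by max over both arrays) with a single running zigzag length plus a direction flag and a running best, scanning adjacent pairs once with O(1) extra space.
-- outside the precondition, e.g. on solution_659_5([]): A raises IndexError, B returns 1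
import Mathlib
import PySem

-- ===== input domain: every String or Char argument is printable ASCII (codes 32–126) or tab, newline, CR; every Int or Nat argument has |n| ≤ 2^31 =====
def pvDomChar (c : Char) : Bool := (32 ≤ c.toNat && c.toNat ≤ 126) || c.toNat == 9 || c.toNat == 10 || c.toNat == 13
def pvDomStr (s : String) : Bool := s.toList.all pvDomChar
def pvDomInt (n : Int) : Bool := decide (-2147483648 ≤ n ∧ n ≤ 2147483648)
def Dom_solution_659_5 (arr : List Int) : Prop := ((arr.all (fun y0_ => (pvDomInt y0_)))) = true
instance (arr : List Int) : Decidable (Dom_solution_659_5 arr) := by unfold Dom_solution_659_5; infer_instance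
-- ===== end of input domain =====

-- B replaces A's two DP arrays by one running length + direction flag in a single scan (objective: alternative decomposition, O(1) extra space).

-- ===== PORT A =====
-- loop body of A's 'for i in range(1, n)' (reads/writes the up/down arrays)
def stepA (arr : List Int) (st : List Int × List Int) (i : Int) : List Int × List Int :=
  let up := st.1
  let down := st.2
  if PySem.List.pyGetD arr i 0 > PySem.List.pyGetD arr (i - 1) 0 then
    (PySem.List.pySetD up i (PySem.List.pyGetD down (i - 1) 0 + 1), PySem.List.pySetD down i 1)
  else if PySem.List.pyGetD arr i 0 < PySem.List.pyGetD arr (i - 1) 0 then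
    (PySem.List.pySetD up i 1, PySem.List.pySetD down i (PySem.List.pyGetD up (i - 1) 0 + 1))
  else
    (PySem.List.pySetD up i 1, PySem.List.pySetD down i 1)

-- Python raises IndexError at 'up[0] = 1' on empty input; Pre_ excludes arr = [], so the
-- total forms pySetD / Option.getD 0 used here are exact on all admitted inputs.
def solution_659_5 (arr : List Int) : Int :=
  let n : Int := arr.length
  let up := List.replicate n.toNat (0 : Int)
  let down := List.replicate n.toNat (0 : Int)
  let up := PySem.List.pySetD up 0 1
  let down := PySem.List.pySetD down 0 1
  let st := (PySem.List.pyRange 1 n 1).foldl (stepA arr) (up, down)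
  max ((PySem.List.max? st.1 (fun y => y)).getD 0) ((PySem.List.max? st.2 (fun y => y)).getD 0)

-- ===== PORT B =====
-- loop body of B's 'for prev, x in zip(arr, arr[1:])'; state = (best, cur, direction)
def stepB (st : Int × Int × Int) (pv : Int × Int) : Int × Int × Int :=
  let best := st.1
  let cur := st.2.1
  let direction := st.2.2
  let prev := pv.1
  let x := pv.2
  let c : Int := (if x > prev then (1 : Int) else 0) - (if x < prev then (1 : Int) else 0)
  let cur := if c = 0 then (1 : Int) else if direction = -c then cur + 1 else 2
  let best := if cur > best then cur else best
  (best, cur, c)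

def solution_659_5_alt (arr : List Int) : Int :=
  ((List.zip arr (arr.drop 1)).foldl stepB (1, 1, 0)).1

-- ===== PRECONDITION & SPEC =====
-- Pre_ excludes only the empty list, on which A raises IndexError at 'up[0] = 1'.
def Pre_solution_659_5 (arr : List Int) : Prop := arr ≠ []
instance (arr : List Int) : Decidable (Pre_solution_659_5 arr) := by unfold Pre_solution_659_5; infer_instance
def pvWitness_solution_659_5 : List Int := ([1, 3, 2, 2, 5])

def Spec_solution_659_5 (arr : List Int) (out : Int) : Prop := out = solution_659_5_alt arr
instance (arr : List Int) (out : Int) : Decidable (Spec_solution_659_5 arr out) := by unfold Spec_solution_659_5; infer_instance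

-- ===== CLAIM (what is proved, stated in full; the proofs are below) =====
def Claim_equal_solution_659_5 : Prop := ∀ (arr : List Int), Dom_solution_659_5 arr → Pre_solution_659_5 arr → Spec_solution_659_5 arr (solution_659_5 arr)

-- ===== LEMMAS AND PROOFS =====

-- the per-index up/down values A's recurrence produces after the first position
def uds (prev u d : Int) : List Int → List Int × List Int
  | [] => ([], [])
  | x :: rest =>
    if x > prev then
      let r := uds x (d + 1) 1 rest
      ((d + 1) :: r.1, 1 :: r.2)
    else if x < prev then
      let r := uds x 1 (u + 1) rest
      (1 :: r.1, (u + 1) :: r.2)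
    else
      let r := uds x 1 1 rest
      (1 :: r.1, 1 :: r.2)

-- how B's (cur, direction) encodes A's (u, d) pair
def rel (u d dir cur : Int) : Prop :=
  1 ≤ cur ∧ ((dir = 1 ∧ u = cur ∧ d = 1) ∨ (dir = -1 ∧ d = cur ∧ u = 1) ∨ (dir = 0 ∧ u = 1 ∧ d = 1 ∧ cur = 1))

lemma getD_append_len (l1 : List Int) (x : Int) (t : List Int) (d : Int) :
    (l1 ++ x :: t).getD l1.length d = x := by
  induction l1 with
  | nil => simp
  | cons h t ih => simp_all

lemma set_append_add (l1 l2 : List Int) (n : Nat) (v : Int) :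
    (l1 ++ l2).set (l1.length + n) v = l1 ++ l2.set n v := by
  induction l1 with
  | nil => simp
  | cons h t ih => simp [Nat.succ_add, ih]

lemma foldA_eq : ∀ (rest front upF downF : List Int) (prev u d lo hi : Int),
    upF.length = front.length → downF.length = front.length →
    lo = (front.length : Int) + 1 → hi = lo + rest.length →
    (PySem.List.pyRange lo hi 1).foldl (stepA (front ++ prev :: rest))
      (upF ++ u :: List.replicate rest.length 0, downF ++ d :: List.replicate rest.length 0)
    = (upF ++ u :: (uds prev u d rest).1, downF ++ d :: (uds prev u d rest).2) := by
  intro rest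
  induction rest with
  | nil =>
    intro front upF downF prev u d lo hi h1 h2 hlo hhi
    have : hi = lo := by simpa using hhi
    subst this
    simp [PySem.List.pyRange_one_eq_nil le_rfl, uds]
  | cons x rest' ih =>
    intro front upF downF prev u d lo hi h1 h2 hlo hhi
    have hlen : ((x :: rest').length : Int) = (rest'.length : Int) + 1 := by
      simp
    have hltt : lo < hi := by rw [hhi, hlen]; omega
    rw [PySem.List.pyRange_one_cons hltt, List.foldl_cons]
    have hlo1 : lo = ((front.length + 1 : Nat) : Int) := by push_cast [Nat.cast_add]; omega
    have hlom1 : lo - 1 = ((front.length : Nat) : Int) := by omega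
    have hget_x : PySem.List.pyGetD (front ++ prev :: x :: rest') lo 0 = x := by
      rw [hlo1, PySem.List.pyGetD_natCast]
      have e : front ++ prev :: x :: rest' = (front ++ [prev]) ++ x :: rest' := by simp
      rw [e, show front.length + 1 = (front ++ [prev]).length from by simp, getD_append_len]
    have hget_prev : PySem.List.pyGetD (front ++ prev :: x :: rest') (lo - 1) 0 = prev := by
      rw [hlom1, PySem.List.pyGetD_natCast, getD_append_len]
    have hget_side : ∀ (l : List Int) (w : Int), l.length = front.length →
        PySem.List.pyGetD (l ++ w :: List.replicate (x :: rest').length 0) (lo - 1) 0 = w := by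
      intro l w hl
      rw [hlom1, PySem.List.pyGetD_natCast, ← hl, getD_append_len]
    have hset : ∀ (l : List Int) (w v : Int), l.length = front.length →
        PySem.List.pySetD (l ++ w :: List.replicate (x :: rest').length 0) lo v
        = l ++ w :: v :: List.replicate rest'.length 0 := by
      intro l w v hl
      rw [hlo1, PySem.List.pySetD_natCast, show List.replicate (x :: rest').length (0 : Int)
        = 0 :: List.replicate rest'.length 0 from by simp [List.replicate_succ],
        show front.length + 1 = l.length + 1 from by omega,
        show (l ++ w :: 0 :: List.replicate rest'.length 0).set (l.length + 1) v
          = (l ++ (w :: 0 :: List.replicate rest'.length 0)).set (l.length + 1) v from rfl,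
        set_append_add l _ 1 v]
      simp
    have hihlo : lo + 1 = (((front ++ [prev]).length : Nat) : Int) + 1 := by
      simp only [List.length_append, List.length_cons, List.length_nil]; push_cast; omega
    have hihhi : hi = (lo + 1) + (rest'.length : Int) := by rw [hhi, hlen]; ring
    have harr : front ++ prev :: x :: rest' = (front ++ [prev]) ++ x :: rest' := by simp
    simp only [stepA, hget_x, hget_prev]
    by_cases hgt : x > prev
    · simp only [if_pos hgt]
      rw [hget_side downF d h2, hset upF u _ h1, hset downF d _ h2]
      rw [show upF ++ u :: (d+1) :: List.replicate rest'.length 0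
            = (upF ++ [u]) ++ (d+1) :: List.replicate rest'.length 0 from by simp,
          show downF ++ d :: (1:Int) :: List.replicate rest'.length 0
            = (downF ++ [d]) ++ (1:Int) :: List.replicate rest'.length 0 from by simp, harr]
      rw [ih (front ++ [prev]) (upF ++ [u]) (downF ++ [d]) x (d+1) 1 (lo+1) hi
        (by simp [h1]) (by simp [h2]) hihlo hihhi]
      simp [uds, hgt]
    · by_cases hlt : x < prev
      · simp only [if_neg hgt, if_pos hlt]
        rw [hget_side upF u h1, hset upF u _ h1, hset downF d _ h2]
        rw [show upF ++ u :: (1:Int) :: List.replicate rest'.length 0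
              = (upF ++ [u]) ++ (1:Int) :: List.replicate rest'.length 0 from by simp,
            show downF ++ d :: (u+1) :: List.replicate rest'.length 0
              = (downF ++ [d]) ++ (u+1) :: List.replicate rest'.length 0 from by simp, harr]
        rw [ih (front ++ [prev]) (upF ++ [u]) (downF ++ [d]) x 1 (u+1) (lo+1) hi
          (by simp [h1]) (by simp [h2]) hihlo hihhi]
        simp [uds, hgt, hlt]
      · simp only [if_neg hgt, if_neg hlt]
        rw [hset upF u _ h1, hset downF d _ h2]
        rw [show upF ++ u :: (1:Int) :: List.replicate rest'.length 0
              = (upF ++ [u]) ++ (1:Int) :: List.replicate rest'.length 0 from by simp,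
            show downF ++ d :: (1:Int) :: List.replicate rest'.length 0
              = (downF ++ [d]) ++ (1:Int) :: List.replicate rest'.length 0 from by simp, harr]
        rw [ih (front ++ [prev]) (upF ++ [u]) (downF ++ [d]) x 1 1 (lo+1) hi
          (by simp [h1]) (by simp [h2]) hihlo hihhi]
        simp [uds, hgt, hlt]

lemma foldB_eq : ∀ (rest : List Int) (prev u d bu bd best cur dir : Int),
    rel u d dir cur → best = max bu bd → 1 ≤ bu → 1 ≤ bd →
    ((List.zip (prev :: rest) rest).foldl stepB (best, cur, dir)).1
    = max ((uds prev u d rest).1.foldl max bu) ((uds prev u d rest).2.foldl max bd) := by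
  intro rest
  induction rest with
  | nil =>
    intro prev u d bu bd best cur dir hrel hbest hbu hbd
    simpa [uds] using hbest
  | cons x rest' ih =>
    intro prev u d bu bd best cur dir hrel hbest hbu hbd
    rw [show List.zip (prev :: x :: rest') (x :: rest') = (prev, x) :: List.zip (x :: rest') rest' from rfl,
        List.foldl_cons]
    obtain ⟨hcur1, hrel⟩ := hrel
    by_cases hgt : x > prev
    · have hd1 : 1 ≤ d := by rcases hrel with ⟨_, _, h⟩ | ⟨_, h, _⟩ | ⟨_, _, h, _⟩ <;> omega
      have hstep : stepB (best, cur, dir) (prev, x)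
          = (max best (d + 1), d + 1, 1) := by
        simp only [stepB, if_pos hgt, if_neg (not_lt.mpr (le_of_lt hgt))]
        rcases hrel with ⟨h1, h2, h3⟩ | ⟨h1, h2, h3⟩ | ⟨h1, h2, h3, h4⟩ <;>
          subst h1 <;> norm_num <;>
          constructor <;> omega
      rw [hstep]
      rw [ih x (d + 1) 1 (max bu (d + 1)) (max bd 1) (max best (d + 1)) (d + 1) 1
        ⟨by omega, Or.inl ⟨rfl, rfl, rfl⟩⟩ (by omega) (by omega) (by omega)]
      simp [uds, hgt]
    · by_cases hlt : x < prev
      · have hu1 : 1 ≤ u := by rcases hrel with ⟨_, h, _⟩ | ⟨_, _, h⟩ | ⟨_, h, _⟩ <;> omega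
        have hstep : stepB (best, cur, dir) (prev, x)
            = (max best (u + 1), u + 1, -1) := by
          simp only [stepB, if_pos hlt, if_neg hgt]
          rcases hrel with ⟨h1, h2, h3⟩ | ⟨h1, h2, h3⟩ | ⟨h1, h2, h3, h4⟩ <;>
            subst h1 <;> norm_num <;>
            constructor <;> omega
        rw [hstep]
        rw [ih x 1 (u + 1) (max bu 1) (max bd (u + 1)) (max best (u + 1)) (u + 1) (-1)
          ⟨by omega, Or.inr (Or.inl ⟨rfl, rfl, rfl⟩)⟩ (by omega) (by omega) (by omega)]
        simp [uds, hgt, hlt]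
      · have hstep : stepB (best, cur, dir) (prev, x) = (best, 1, 0) := by
          simp only [stepB, if_neg hgt, if_neg hlt]
          norm_num
          omega
        rw [hstep]
        rw [ih x 1 1 (max bu 1) (max bd 1) best 1 0
          ⟨le_refl 1, Or.inr (Or.inr ⟨rfl, rfl, rfl, rfl⟩)⟩ (by omega) (by omega) (by omega)]
        simp [uds, hgt, hlt]

-- ===== VERDICT (by name: the statement is the Claim_ definition above) =====
theorem solution_659_5_spec : Claim_equal_solution_659_5 := by
  intro arr _ hpre
  match arr with
  | [] => exact absurd rfl hpre
  | a :: rest =>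
    unfold Spec_solution_659_5
    have hB : solution_659_5_alt (a :: rest)
        = max ((uds a 1 1 rest).1.foldl max 1) ((uds a 1 1 rest).2.foldl max 1) := by
      unfold solution_659_5_alt
      rw [show (a :: rest).drop 1 = rest from rfl]
      exact foldB_eq rest a 1 1 1 1 1 1 0
        ⟨le_refl 1, Or.inr (Or.inr ⟨rfl, rfl, rfl, rfl⟩)⟩ (by omega) le_rfl le_rfl
    have hA : solution_659_5 (a :: rest)
        = max ((uds a 1 1 rest).1.foldl max 1) ((uds a 1 1 rest).2.foldl max 1) := by
      unfold solution_659_5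
      have hfold := foldA_eq rest [] [] [] a 1 1 1 (((a :: rest).length : Int)) rfl rfl
        (by simp) (by simp; ring)
      have hrepl : List.replicate (((a :: rest).length : Int)).toNat (0 : Int)
          = 0 :: List.replicate rest.length 0 := by
        simp [List.replicate_succ]
      have hset0 : PySem.List.pySetD (0 :: List.replicate rest.length (0 : Int)) 0 1
          = 1 :: List.replicate rest.length 0 := by
        simp [PySem.List.pySetD_of_nonneg]
      simp only [hrepl, hset0]
      simp only [List.nil_append] at hfold
      rw [hfold, PySem.List.max?_id_cons, PySem.List.max?_id_cons]
      rfl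
    rw [hA, hB]
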